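-- pv_equiv track=rewrite | github.com/wotzlaff/ssp-arcflow | ssplib/arcflow.py | create_variable_start
-- ===== SOURCE A (Python) =====
-- import collections
--
-- def create_variable_start(inst, patterns):
--     threshold, lvec, bvec = inst
--     vals = collections.Counter()
--     for pattern in patterns:
--         start = 0
--         for item, count in pattern.items():
--             for _ in range(count):
--                 end = min(threshold, start + lvec[item])
--                 vals[(start, end, item)] += 1
--                 start = end
--     return vals
-- ===== SOURCE B (Python) =====
-- import collections
--
-- def _advancing_arcs(threshold, step, limit, start):
--     """Distinct arcs of the chain start -> min(threshold, start+step) -> ...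
--     until it saturates at a fixed point, capped at `limit` arcs.
--     Returns (arcs, final_position)."""
--     arcs = []
--     s = start
--     while len(arcs) < limit:
--         e = min(threshold, s + step)
--         if e == s:
--             break
--         arcs.append((s, e))
--         s = e
--     return arcs, s
--
-- def create_variable_start(inst, patterns):
--     threshold, lvec, bvec = inst
--     vals = collections.Counter()
--     for pattern in patterns:
--         start = 0
--         for item, count in pattern.items():
--             if count > 0:
--                 arcs, start = _advancing_arcs(threshold, lvec[item], count, start)
--                 for a, e in arcs:
--                     vals[(a, e, item)] += 1
--                 if len(arcs) < count:
--                     # chain saturated: all remaining arcs are the same self-loop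
--                     vals[(start, start, item)] += count - len(arcs)
--     return vals
-- ===== Notes on version B (the rewrite author's own statement) =====
-- stated objective: alternative
-- what changed: B builds each item's distinct advancing arcs as a list (the chain saturates at a fixed point) and then bulk-adds the whole remaining count to the self-loop key in one Counter update, instead of A's one Counter increment per unit of count.
import Mathlib
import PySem

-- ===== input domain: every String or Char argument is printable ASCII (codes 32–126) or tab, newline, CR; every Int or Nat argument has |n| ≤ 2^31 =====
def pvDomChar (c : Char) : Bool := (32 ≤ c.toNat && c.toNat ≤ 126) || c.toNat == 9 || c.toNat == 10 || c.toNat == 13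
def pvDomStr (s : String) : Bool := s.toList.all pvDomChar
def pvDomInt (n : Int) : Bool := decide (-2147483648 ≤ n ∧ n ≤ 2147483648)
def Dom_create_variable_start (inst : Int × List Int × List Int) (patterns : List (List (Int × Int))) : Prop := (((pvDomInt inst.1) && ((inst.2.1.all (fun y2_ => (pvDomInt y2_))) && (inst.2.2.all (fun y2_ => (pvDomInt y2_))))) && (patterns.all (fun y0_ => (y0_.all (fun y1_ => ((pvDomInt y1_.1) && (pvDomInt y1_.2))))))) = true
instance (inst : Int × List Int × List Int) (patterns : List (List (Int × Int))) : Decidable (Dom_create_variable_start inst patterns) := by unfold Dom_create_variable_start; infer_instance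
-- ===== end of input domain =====

-- B first builds the list of DISTINCT advancing arcs of an item's chain (the chain saturates at
-- a fixed point) and then bulk-adds the whole remaining count to the self-loop key in one
-- Counter update, instead of iterating once per unit of count; objective: alternative
-- algorithm (fewer Counter updates when counts exceed the chain length; not measured faster).

-- ===== PORT A =====
-- state of the inner `for _ in range(count)` loop: (start, vals); none = IndexError from lvec[item]
def pvALoop (threshold : Int) (lvec : List Int) (item : Int) :
    Nat → Int → PySem.Dict (Int × Int × Int) Int → Option (Int × PySem.Dict (Int × Int × Int) Int)
  | 0, start, vals => some (start, vals)
  | Nat.succ k, start, vals =>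
    match PySem.List.pyGet? lvec item with
    | none => none
    | some l =>
      let e := min threshold (start + l)
      pvALoop threshold lvec item k e (vals.modify (start, e, item) 0 (· + 1))

-- one pattern: `start = 0; for item, count in pattern.items(): …`
def pvAPattern (threshold : Int) (lvec : List Int) (pattern : List (Int × Int))
    (vals : PySem.Dict (Int × Int × Int) Int) : Option (PySem.Dict (Int × Int × Int) Int) :=
  (pattern.foldl
      (fun st ic => st.bind (fun sv => pvALoop threshold lvec ic.1 ic.2.toNat sv.1 sv.2))
      (some (0, vals))).map (·.2)

def create_variable_start (inst : Int × List Int × List Int) (patterns : List (List (Int × Int))) : List (Int × Int × Int × Int) :=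
  match patterns.foldl (fun st pattern => st.bind (pvAPattern inst.1 inst.2.1 pattern))
      (some PySem.Dict.empty) with
  | none => []   -- IndexError; these inputs are excluded by Pre_
  | some vals => vals.items.map (fun p => (p.1.1, p.1.2.1, p.1.2.2, p.2))

-- ===== PORT B =====
-- `_advancing_arcs`: the `while len(arcs) < limit` loop (fuel = limit), returns (arcs, final s)
def pvBArcs (threshold step : Int) : Nat → Int → List (Int × Int) × Int
  | 0, s => ([], s)
  | Nat.succ k, s =>
    let e := min threshold (s + step)
    if e = s then ([], s)
    else
      let r := pvBArcs threshold step k e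
      ((s, e) :: r.1, r.2)

-- body of `for item, count in pattern.items()` in B; none = IndexError from lvec[item]
def pvBItem (threshold : Int) (lvec : List Int) (item count start : Int)
    (vals : PySem.Dict (Int × Int × Int) Int) : Option (Int × PySem.Dict (Int × Int × Int) Int) :=
  if 0 < count then
    match PySem.List.pyGet? lvec item with
    | none => none
    | some step =>
      let r := pvBArcs threshold step count.toNat start
      let vals' := r.1.foldl (fun d ae => d.modify (ae.1, ae.2, item) 0 (· + 1)) vals
      if (r.1.length : Int) < count then
        some (r.2, vals'.modify (r.2, r.2, item) 0 (· + (count - r.1.length)))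
      else some (r.2, vals')
  else some (start, vals)

def pvBPattern (threshold : Int) (lvec : List Int) (pattern : List (Int × Int))
    (vals : PySem.Dict (Int × Int × Int) Int) : Option (PySem.Dict (Int × Int × Int) Int) :=
  (pattern.foldl
      (fun st ic => st.bind (fun sv => pvBItem threshold lvec ic.1 ic.2 sv.1 sv.2))
      (some (0, vals))).map (·.2)

def create_variable_start_alt (inst : Int × List Int × List Int) (patterns : List (List (Int × Int))) : List (Int × Int × Int × Int) :=
  match patterns.foldl (fun st pattern => st.bind (pvBPattern inst.1 inst.2.1 pattern))
      (some PySem.Dict.empty) with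
  | none => []
  | some vals => vals.items.map (fun p => (p.1.1, p.1.2.1, p.1.2.2, p.2))

-- ===== PRECONDITION & SPEC =====
-- Pre_ excludes exactly the inputs on which A raises IndexError: some pattern entry with a
-- positive count whose item is not a valid (possibly negative) Python index into lvec.
def Pre_create_variable_start (inst : Int × List Int × List Int) (patterns : List (List (Int × Int))) : Prop :=
  ∀ pattern ∈ patterns, ∀ ic ∈ pattern, 0 < ic.2 → PySem.Raise.InRange inst.2.1.length ic.1
instance (inst : Int × List Int × List Int) (patterns : List (List (Int × Int))) : Decidable (Pre_create_variable_start inst patterns) := by unfold Pre_create_variable_start; infer_instance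
def pvWitness_create_variable_start : (Int × List Int × List Int) × (List (List (Int × Int))) :=
  ((5, [2, 0], []), [[(0, 4), (1, 3)], [(0, 1)]])

def Spec_create_variable_start (inst : Int × List Int × List Int) (patterns : List (List (Int × Int))) (out : List (Int × Int × Int × Int)) : Prop := out = create_variable_start_alt inst patterns
instance (inst : Int × List Int × List Int) (patterns : List (List (Int × Int))) (out : List (Int × Int × Int × Int)) : Decidable (Spec_create_variable_start inst patterns out) := by unfold Spec_create_variable_start; infer_instance

-- ===== CLAIM (what is proved, stated in full; the proofs are below) =====
def Claim_equal_create_variable_start : Prop := ∀ (inst : Int × List Int × List Int) (patterns : List (List (Int × Int))), Dom_create_variable_start inst patterns → Pre_create_variable_start inst patterns → Spec_create_variable_start inst patterns (create_variable_start inst patterns)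

-- ===== LEMMAS AND PROOFS =====
theorem pv_modify_modify (d : PySem.Dict (Int × Int × Int) Int) (k : Int × Int × Int) (a b : Int) :
    (d.modify k 0 (· + a)).modify k 0 (· + b) = d.modify k 0 (· + (a + b)) := by
  show (d.insert k (d.getD k 0 + a)).insert k ((d.insert k (d.getD k 0 + a)).getD k 0 + b)
      = d.insert k (d.getD k 0 + (a + b))
  rw [PySem.Dict.getD_insert_self, PySem.Dict.insert_insert_self, add_assoc]

-- once the step reaches its fixed point, A's remaining iterations all bump the same key
theorem pvALoop_saturated (threshold : Int) (lvec : List Int) (item : Int) (l : Int)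
    (hget : PySem.List.pyGet? lvec item = some l) (start : Int)
    (hfix : min threshold (start + l) = start) :
    ∀ (k : Nat) (c : Int) (vals : PySem.Dict (Int × Int × Int) Int),
      pvALoop threshold lvec item k start (vals.modify (start, start, item) 0 (· + c))
        = some (start, vals.modify (start, start, item) 0 (· + (c + k))) := by
  intro k
  induction k with
  | zero => intro c vals; simp [pvALoop]
  | succ k ih =>
    intro c vals
    rw [pvALoop, hget]
    simp only [hfix, pv_modify_modify]
    rw [ih (c + 1) vals]
    congr 3
    funext x
    push_cast
    ring

-- A's per-item loop computes exactly B's two-phase result (advancing arcs, then bulk self-loop)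
theorem pvALoop_eq_arcs (threshold : Int) (lvec : List Int) (item : Int) (l : Int)
    (hget : PySem.List.pyGet? lvec item = some l) :
    ∀ (k : Nat) (s : Int) (vals : PySem.Dict (Int × Int × Int) Int),
      pvALoop threshold lvec item k s vals =
        some ((pvBArcs threshold l k s).2,
          let vals' := (pvBArcs threshold l k s).1.foldl
            (fun d ae => d.modify (ae.1, ae.2, item) 0 (· + 1)) vals
          if (pvBArcs threshold l k s).1.length < k then
            vals'.modify ((pvBArcs threshold l k s).2, (pvBArcs threshold l k s).2, item) 0
              (· + ((k : Int) - (pvBArcs threshold l k s).1.length))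
          else vals') := by
  intro k
  induction k with
  | zero => intro s vals; simp [pvALoop, pvBArcs]
  | succ k ih =>
    intro s vals
    rw [pvALoop, hget]
    simp only
    by_cases hfix : min threshold (s + l) = s
    · rw [hfix, pvALoop_saturated threshold lvec item l hget s hfix k 1 vals]
      simp only [pvBArcs, if_pos hfix, List.foldl_nil, List.length_nil, Nat.zero_lt_succ, if_true]
      congr 3
      funext x
      push_cast
      ring
    · rw [ih (min threshold (s + l)) (vals.modify (s, min threshold (s + l), item) 0 (· + 1))]
      simp only [pvBArcs, if_neg hfix, List.foldl_cons, List.length_cons, Nat.succ_lt_succ_iff]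
      simp only [Nat.cast_add, Nat.cast_one, add_sub_add_right_eq_sub]

theorem pvALoop_eq_pvBItem (threshold : Int) (lvec : List Int) (item count start : Int)
    (vals : PySem.Dict (Int × Int × Int) Int) :
    pvALoop threshold lvec item count.toNat start vals = pvBItem threshold lvec item count start vals := by
  unfold pvBItem
  by_cases hc : 0 < count
  · rw [if_pos hc]
    cases hget : PySem.List.pyGet? lvec item with
    | none =>
      have h1 : 0 < count.toNat := by omega
      obtain ⟨k, hk⟩ := Nat.exists_eq_add_of_lt h1
      rw [hk]
      simp only [pvALoop, hget]
    | some l =>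
      rw [pvALoop_eq_arcs threshold lvec item l hget count.toNat start vals]
      simp only
      have hlen : ((pvBArcs threshold l count.toNat start).1.length : Int) < count
          ↔ (pvBArcs threshold l count.toNat start).1.length < count.toNat := by omega
      by_cases hb : (pvBArcs threshold l count.toNat start).1.length < count.toNat
      · rw [if_pos hb, if_pos (hlen.mpr hb)]
        congr 3
        funext x
        have : ((count.toNat : Int)) = count := by omega
        rw [this]
      · rw [if_neg hb, if_neg (fun h => hb (hlen.mp h))]
  · rw [if_neg hc]
    have : count.toNat = 0 := by omega
    rw [this, pvALoop]

theorem pvAPattern_eq_pvBPattern (threshold : Int) (lvec : List Int)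
    (pattern : List (Int × Int)) (vals : PySem.Dict (Int × Int × Int) Int) :
    pvAPattern threshold lvec pattern vals = pvBPattern threshold lvec pattern vals := by
  unfold pvAPattern pvBPattern
  simp only [pvALoop_eq_pvBItem]

-- ===== VERDICT (by name: the statement is the Claim_ definition above) =====
theorem create_variable_start_spec : Claim_equal_create_variable_start := by
  intro inst patterns _ _
  show create_variable_start inst patterns = create_variable_start_alt inst patterns
  unfold create_variable_start create_variable_start_alt
  simp only [pvAPattern_eq_pvBPattern]
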